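-- pv_equiv track=rewrite | github.com/pypi-data/pypi-mirror-99 | packages/tuhlbox/tuhlbox-0.3.4-py3-none-any.whl/tuhlbox/life.py | get_features_for_sample
-- ===== SOURCE A (Python) =====
-- from collections import defaultdict
--
-- def get_features_for_sample(sample):
--     """
--     Calculate statistical features from samples.
--
--     First, the occurrance of all words is counted.
--     Then, this method returns the number of words that are between pre-set
--     frequency thresholds.
--     Args:
--         sample: a list of words to calculate metrics from.
--
--     Returns: a list of four threshold counts: [
--             1. total number of words,
--             2. number of words that occur once,
--             3. number of words that occur 2-4 times,
--             4. number of words that occur 5-10 times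
--         ].
--
--     """
--     counts = defaultdict(int)
--     for word in sample:
--         counts[word] += 1
--     v0 = len(counts.keys())
--     v1, v2, v3 = 0, 0, 0
--     for occurrences in counts.values():
--         if occurrences <= 1:
--             v1 += 1
--         elif occurrences <= 4:
--             v2 += 1
--         elif occurrences <= 10:
--             v3 += 1
--
--     return [v0, v1, v2, v3]
-- ===== SOURCE B (Python) =====
-- def get_features_for_sample(sample):
--     """Sort the words so equal words are adjacent, then scan runs of equal
--     words with two indices; no dictionary at all.  Each run is one unique
--     word and its length is that word's occurrence count."""
--     s = sorted(sample)
--     v0 = v1 = v2 = v3 = 0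
--     i = 0
--     n = len(s)
--     while i < n:
--         j = i + 1
--         while j < n and s[j] == s[i]:
--             j += 1
--         run = j - i
--         v0 += 1
--         if run == 1:
--             v1 += 1
--         elif run <= 4:
--             v2 += 1
--         elif run <= 10:
--             v3 += 1
--         i = j
--     return [v0, v1, v2, v3]
-- ===== Notes on version B (the rewrite author's own statement) =====
-- stated objective: alternative
-- what changed: B drops the dictionary entirely: it sorts the words so equal words are adjacent and scans runs of equal words with two indices, bucketing each run length; A counts into a hash map and iterates its values.
import Mathlib
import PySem

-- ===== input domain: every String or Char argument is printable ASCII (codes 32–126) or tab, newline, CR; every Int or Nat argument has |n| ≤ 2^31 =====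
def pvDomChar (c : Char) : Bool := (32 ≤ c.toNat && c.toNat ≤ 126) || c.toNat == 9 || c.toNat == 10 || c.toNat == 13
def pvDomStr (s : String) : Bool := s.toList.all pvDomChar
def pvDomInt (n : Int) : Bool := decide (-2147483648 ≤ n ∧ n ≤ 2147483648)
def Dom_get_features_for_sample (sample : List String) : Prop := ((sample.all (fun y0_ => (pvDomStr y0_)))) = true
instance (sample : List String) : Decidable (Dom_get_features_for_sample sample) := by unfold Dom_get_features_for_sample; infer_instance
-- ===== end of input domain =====

-- B sorts the words and scans runs of equal adjacent words with two indices (no dictionary) instead of A's hash-map counting; alternative algorithm, not claimed faster.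


-- ===== PORT A =====
def get_features_for_sample (sample : List String) : List Int :=
  let counts := sample.foldl (fun d w => d.modify w 0 (· + 1)) (PySem.Dict.empty : PySem.Dict String Int)
  let v0 : Int := counts.keys.length
  let acc := counts.values.foldl (fun (acc : Int × Int × Int) occurrences =>
      if occurrences ≤ 1 then (acc.1 + 1, acc.2.1, acc.2.2)
      else if occurrences ≤ 4 then (acc.1, acc.2.1 + 1, acc.2.2)
      else if occurrences ≤ 10 then (acc.1, acc.2.1, acc.2.2 + 1)
      else acc) (0, 0, 0)
  [v0, acc.1, acc.2.1, acc.2.2]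

-- ===== PORT B =====
-- Source B's outer while loop over index i becomes structural recursion on the suffix s[i:];
-- the inner while that advances j over equal words is the takeWhile/dropWhile split of that suffix
-- (run = j - i = 1 + length of the equal prefix of the tail).
def pvScanRuns : List String → Int × Int × Int × Int → Int × Int × Int × Int
  | [], acc => acc
  | x :: rest, (v0, v1, v2, v3) =>
      let run : Int := 1 + ((rest.takeWhile (fun y => y == x)).length : Int)
      let rest' := rest.dropWhile (fun y => y == x)
      pvScanRuns rest'
        (if run = 1 then (v0 + 1, v1 + 1, v2, v3)
         else if run ≤ 4 then (v0 + 1, v1, v2 + 1, v3)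
         else if run ≤ 10 then (v0 + 1, v1, v2, v3 + 1)
         else (v0 + 1, v1, v2, v3))
termination_by s => s.length
decreasing_by
  exact Nat.lt_succ_of_le (List.length_dropWhile_le _ _)

def get_features_for_sample_alt (sample : List String) : List Int :=
  let s := PySem.List.sorted sample (fun x => x) false
  let r := pvScanRuns s (0, 0, 0, 0)
  [r.1, r.2.1, r.2.2.1, r.2.2.2]

-- ===== PRECONDITION & SPEC =====
def Spec_get_features_for_sample (sample : List String) (out : List Int) : Prop := out = get_features_for_sample_alt sample
instance (sample : List String) (out : List Int) : Decidable (Spec_get_features_for_sample sample out) := by unfold Spec_get_features_for_sample; infer_instance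

-- ===== CLAIM (what is proved, stated in full; the proofs are below) =====
def Claim_equal_get_features_for_sample : Prop := ∀ (sample : List String), Dom_get_features_for_sample sample → Spec_get_features_for_sample sample (get_features_for_sample sample)

-- ===== LEMMAS AND PROOFS =====

-- the list of run lengths B's scan walks over
def pvRunLengths : List String → List Int
  | [] => []
  | x :: rest =>
      (1 + ((rest.takeWhile (fun y => y == x)).length : Int)) ::
        pvRunLengths (rest.dropWhile (fun y => y == x))
termination_by s => s.length
decreasing_by
  exact Nat.lt_succ_of_le (List.length_dropWhile_le _ _)

-- B's scan characterised: it counts the runs and buckets their lengths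
theorem scan_eq (s : List String) : ∀ a b c d : Int,
    pvScanRuns s (a, b, c, d) =
      (a + ((pvRunLengths s).length : Int),
       b + ((pvRunLengths s).countP (fun r => r == 1) : Int),
       c + ((pvRunLengths s).countP (fun r => !(r == 1) && decide (r ≤ 4)) : Int),
       d + ((pvRunLengths s).countP (fun r => !(decide (r ≤ 4)) && decide (r ≤ 10)) : Int)) := by
  induction s using pvRunLengths.induct with
  | case1 => simp [pvScanRuns, pvRunLengths]
  | case2 x rest ih =>
    intro a b c d
    rw [pvScanRuns, pvRunLengths]
    set run : Int := 1 + ((rest.takeWhile (fun y => y == x)).length : Int) with hrun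
    have hpos : (1:Int) ≤ run := by rw [hrun]; omega
    simp only [List.length_cons, List.countP_cons]
    by_cases h1 : run = 1
    · simp only [h1, reduceIte]
      rw [ih]
      simp; omega
    · rw [if_neg h1]
      by_cases h4 : run ≤ 4
      · rw [if_pos h4, ih]
        simp [h1, h4]; omega
      · rw [if_neg h4]
        by_cases h10 : run ≤ 10
        · rw [if_pos h10, ih]
          simp [h1, h4, h10]; omega
        · rw [if_neg h10, ih]
          simp [h1, h4, h10]; omega

-- A's triple-accumulator ladder characterised by countP's
theorem ladder_foldl (vs : List Int) (a b c : Int) :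
    vs.foldl (fun (acc : Int × Int × Int) occurrences =>
      if occurrences ≤ 1 then (acc.1 + 1, acc.2.1, acc.2.2)
      else if occurrences ≤ 4 then (acc.1, acc.2.1 + 1, acc.2.2)
      else if occurrences ≤ 10 then (acc.1, acc.2.1, acc.2.2 + 1)
      else acc) (a, b, c)
    = (a + (vs.countP (fun v => decide (v ≤ 1)) : Int),
       b + (vs.countP (fun v => !(decide (v ≤ 1)) && decide (v ≤ 4)) : Int),
       c + (vs.countP (fun v => !(decide (v ≤ 4)) && decide (v ≤ 10)) : Int)) := by
  induction vs generalizing a b c with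
  | nil => simp
  | cons v vs ih =>
    simp only [List.foldl_cons, List.countP_cons]
    by_cases h1 : v ≤ 1
    · simp [h1, ih]; omega
    · by_cases h4 : v ≤ 4
      · simp [h1, h4, ih]; omega
      · by_cases h10 : v ≤ 10
        · simp [h1, h4, h10, ih]; omega
        · simp [h1, h4, h10, ih]

-- in a ≤-sorted list the run lengths are exactly the per-word counts
theorem runLengths_perm (s : List String) (h : s.Pairwise (· ≤ ·)) :
    (pvRunLengths s).Perm ((PySem.Set.ofList s).map (fun k => (s.count k : Int))) := by
  induction s using pvRunLengths.induct with
  | case1 => simp [pvRunLengths]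
  | case2 x rest ih =>
    rw [pvRunLengths]
    set t := rest.takeWhile (fun y => y == x) with ht
    set d := rest.dropWhile (fun y => y == x) with hd
    have hrest : rest = t ++ d := (List.takeWhile_append_dropWhile).symm
    -- every element of t is x
    have htx : ∀ y ∈ t, y = x := by
      intro y hy
      have := List.mem_takeWhile_imp hy
      simpa using this
    -- no element of d is x
    have hdx : ∀ y ∈ d, y ≠ x := by
      intro y hy
      rcases hd' : d with _ | ⟨z, d'⟩
      · simp [hd'] at hy
      · have hz : ¬ (z == x) = true := by
          have := List.head?_dropWhile_not (fun y => y == x) rest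
          rw [← hd, hd'] at this
          simpa using this
        have hzx : z ≠ x := by simpa using hz
        have hxz : x < z := by
          have hzrest : z ∈ rest := by rw [hrest, hd']; simp
          have := (List.pairwise_cons.1 h).1 z hzrest
          exact lt_of_le_of_ne this (Ne.symm hzx)
        rw [hd'] at hy
        rcases List.mem_cons.1 hy with rfl | hy'
        · exact hzx
        · -- y ∈ d', and z ≤ y from sortedness of d
          have hpd : (z :: d').Pairwise (· ≤ ·) := by
            have : d.Sublist rest := by rw [hd]; exact List.dropWhile_sublist _
            have := (List.pairwise_cons.1 h).2.sublist this
            rwa [hd'] at this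
          have hzy : z ≤ y := (List.pairwise_cons.1 hpd).1 y hy'
          intro hyx; rw [hyx] at hzy; exact absurd hzy (not_le.2 hxz)
    -- count x (x :: rest) = 1 + t.length
    have hcx : (x :: rest).count x = 1 + t.length := by
      rw [List.count_cons_self, hrest, List.count_append]
      have h1 : t.count x = t.length := by
        rw [List.count_eq_length]
        intro y hy; rw [htx y hy]
      have h2 : d.count x = 0 := by
        rw [List.count_eq_zero]
        intro hx; exact (hdx x hx) rfl
      omega
    -- key-list permutation: ofList (x :: rest) ~ x :: ofList d
    have hkeys : (PySem.Set.ofList (x :: rest)).Perm (x :: PySem.Set.ofList d) := by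
      rw [List.perm_ext_iff_of_nodup (PySem.Set.nodup_ofList _)]
      · intro a
        simp only [PySem.Set.mem_ofList, List.mem_cons, hrest, List.mem_append]
        constructor
        · rintro (rfl | hy | hy)
          · exact Or.inl rfl
          · exact Or.inl (htx a hy)
          · exact Or.inr hy
        · rintro (rfl | hy)
          · exact Or.inl rfl
          · exact Or.inr (Or.inr hy)
      · refine List.nodup_cons.2 ⟨?_, PySem.Set.nodup_ofList _⟩
        intro hx
        exact (hdx x ((PySem.Set.mem_ofList _ _).1 hx)) rfl
    -- counts agree on d's elements between full list and d
    have hcd : ∀ k ∈ PySem.Set.ofList d, ((x :: rest).count k : Int) = (d.count k : Int) := by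
      intro k hk
      have hkd : k ∈ d := (PySem.Set.mem_ofList _ _).1 hk
      have hkx : k ≠ x := hdx k hkd
      have hstep : (x :: rest).count k = rest.count k := by
        simp [Ne.symm hkx]
      rw [hstep, hrest, List.count_append]
      have : t.count k = 0 := by
        rw [List.count_eq_zero]
        intro hkt; exact hkx (htx k hkt)
      omega
    -- sortedness of d for the IH
    have hpd : d.Pairwise (· ≤ ·) := by
      have : d.Sublist rest := by rw [hd]; exact List.dropWhile_sublist _
      exact (List.pairwise_cons.1 h).2.sublist this
    refine List.Perm.trans ?_ ((hkeys.map _).symm)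
    rw [List.map_cons]
    have hfx : ((x :: rest).count x : Int) = 1 + (t.length : Int) := by
      rw [hcx]; push_cast; ring
    rw [hfx, List.map_congr_left hcd]
    exact List.Perm.cons _ (ih hpd)

-- every value of a counter is at least 1
theorem counter_values_pos (xs : List String) :
    ∀ v ∈ (PySem.Dict.counter xs).values, (1 : Int) ≤ v := by
  intro v hv
  simp only [PySem.Dict.values, PySem.Dict.items_counter, List.map_map, List.mem_map] at hv
  obtain ⟨k, hk, rfl⟩ := hv
  have hmem : k ∈ xs := (PySem.Set.mem_ofList _ _).1 hk
  have : 1 ≤ xs.count k := List.count_pos_iff.2 hmem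
  simp only [Function.comp]
  exact_mod_cast this

-- ===== VERDICT (by name: the statement is the Claim_ definition above) =====
theorem get_features_for_sample_spec : Claim_equal_get_features_for_sample := by
  intro sample _
  unfold Spec_get_features_for_sample get_features_for_sample get_features_for_sample_alt
  simp only [← PySem.Dict.counter_eq_foldl, scan_eq, ladder_foldl]
  set s := PySem.List.sorted sample (fun x => x) false with hsdef
  have hsp : s.Pairwise (· ≤ ·) := PySem.List.sorted_pairwise sample (fun x => x)
  have hps : s.Perm sample := PySem.List.sorted_perm sample (fun x => x) false
  -- the counter's value list, written as counts over the distinct words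
  have hvals : (PySem.Dict.counter sample).values
      = (PySem.Set.ofList sample).map (fun k => (sample.count k : Int)) := by
    simp [PySem.Dict.values, PySem.Dict.items_counter, List.map_map, Function.comp]
  -- the run lengths of the sorted list are a permutation of those counts
  have hruns : (pvRunLengths s).Perm ((PySem.Set.ofList sample).map (fun k => (sample.count k : Int))) := by
    refine (runLengths_perm s hsp).trans ?_
    have hkeys : (PySem.Set.ofList s).Perm (PySem.Set.ofList sample) := by
      rw [List.perm_ext_iff_of_nodup (PySem.Set.nodup_ofList _) (PySem.Set.nodup_ofList _)]
      intro a
      simp only [PySem.Set.mem_ofList]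
      exact hps.mem_iff
    have hcnt : ∀ k ∈ PySem.Set.ofList s, (s.count k : Int) = (sample.count k : Int) := by
      intro k _
      exact congrArg Int.ofNat (hps.count_eq k)
    rw [List.map_congr_left hcnt]
    exact hkeys.map _
  rw [hvals]
  -- all counts are ≥ 1, so the bucket predicates of A and B agree on them
  have hpos : ∀ v ∈ (PySem.Set.ofList sample).map (fun k => (sample.count k : Int)), (1 : Int) ≤ v := by
    have := counter_values_pos sample
    rwa [hvals] at this
  have hp1 : ((PySem.Set.ofList sample).map (fun k => (sample.count k : Int))).countP (fun v => decide (v ≤ 1))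
      = ((PySem.Set.ofList sample).map (fun k => (sample.count k : Int))).countP (fun r => r == 1) := by
    refine List.countP_congr ?_
    intro v hv
    have := hpos v hv
    by_cases h1 : v = 1 <;> simp [h1] <;> omega
  have hp2 : ((PySem.Set.ofList sample).map (fun k => (sample.count k : Int))).countP (fun v => !(decide (v ≤ 1)) && decide (v ≤ 4))
      = ((PySem.Set.ofList sample).map (fun k => (sample.count k : Int))).countP (fun r => !(r == 1) && decide (r ≤ 4)) := by
    refine List.countP_congr ?_
    intro v hv
    have := hpos v hv
    by_cases h1 : v = 1 <;> simp [h1] <;> omega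
  rw [hp1, hp2]
  rw [hruns.countP_eq, hruns.countP_eq, hruns.countP_eq, hruns.length_eq]
  simp [PySem.Dict.keys_counter]
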